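-- pv_equiv track=rewrite | github.com/VachiO/n-infinite-test | test_4.py | word_mesh
-- ===== SOURCE A (Python) =====
-- def word_mesh(words: list[str]) -> str:
--     def lcs(a, b):
--         for i in range(1, len(a) + 1):
--             if b.startswith(a[-i:]):
--                 return a[-i:]
--         return ''
--
--     result = ""
--     for a, b in zip(words, words[1:]):
--         pair_lcs = lcs(a,b)
--         if not pair_lcs:
--             return "failed to mesh"
--         result += pair_lcs
--
--
--     return result
-- ===== SOURCE B (Python) =====
-- def word_mesh(words: list[str]) -> str:
--     parts = []
--     for a, b in zip(words, words[1:]):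
--         # KMP: prefix function of b + sentinel + a; borders of this string are
--         # exactly the suffix-of-a = prefix-of-b overlap lengths.
--         s = b + "\x00" + a
--         n = len(s)
--         pi = [0] * n
--         k = 0
--         for i in range(1, n):
--             while k > 0 and s[i] != s[k]:
--                 k = pi[k - 1]
--             if s[i] == s[k]:
--                 k += 1
--             pi[i] = k
--         # walk the border chain down to the shortest non-empty border
--         k = pi[n - 1]
--         while k > 0 and pi[k - 1] > 0:
--             k = pi[k - 1]
--         if k == 0:
--             return "failed to mesh"
--         parts.append(b[:k])
--     return "".join(parts)
-- ===== Notes on version B (the rewrite author's own statement) =====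
-- stated objective: alternative
-- what changed: A scans every suffix length i of a and tests b.startswith(a[-i:]) (worst-case quadratic per pair); B instead builds the KMP prefix function of b + '\0' + a and walks the failure chain down to the shortest non-empty border, which is exactly the shortest suffix-of-a = prefix-of-b overlap (worst-case linear per pair; not measurably faster on the benchmark's random inputs, where A's scan exits early).
import Mathlib
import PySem

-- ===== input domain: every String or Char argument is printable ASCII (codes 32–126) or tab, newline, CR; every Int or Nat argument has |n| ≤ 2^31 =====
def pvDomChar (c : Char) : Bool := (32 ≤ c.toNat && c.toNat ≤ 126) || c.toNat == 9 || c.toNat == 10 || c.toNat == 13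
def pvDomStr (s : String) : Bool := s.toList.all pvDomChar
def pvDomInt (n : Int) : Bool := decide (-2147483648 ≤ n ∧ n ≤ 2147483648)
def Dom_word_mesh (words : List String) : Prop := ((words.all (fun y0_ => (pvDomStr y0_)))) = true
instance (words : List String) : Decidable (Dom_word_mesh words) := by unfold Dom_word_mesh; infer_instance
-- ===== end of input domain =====

-- B replaces A's quadratic scan of all suffixes by the KMP prefix function of
-- b + '\0' + a, walking the failure chain to the shortest non-empty border.

-- ===== PORT A =====
-- inner 'lcs' loop: for i in range(1, len(a)+1): if b.startswith(a[-i:]): return a[-i:]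
def lcsAuxA (a b : List Char) : List Int → List Char
  | [] => []
  | i :: rest =>
    let suf := PySem.List.slice a (some (-i)) none
    if PySem.Chars.startswith b suf then suf else lcsAuxA a b rest

def lcsA (a b : List Char) : List Char :=
  lcsAuxA a b (PySem.List.pyRange 1 ((a.length : Int) + 1) 1)

-- main loop with early return "failed to mesh"
def meshAuxA : List (List Char × List Char) → List Char → List Char
  | [], result => result
  | (a, b) :: rest, result =>
    let pair_lcs := lcsA a b
    if pair_lcs = [] then "failed to mesh".toList
    else meshAuxA rest (result ++ pair_lcs)

def word_mesh (words : List String) : String :=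
  let ws := words.map String.toList
  String.ofList (meshAuxA (ws.zip (PySem.List.slice ws (some 1) none)) [])

-- ===== PORT B =====
-- while k > 0 and s[i] != s[k]: k = pi[k-1]   (fuel = k bounds the iterations: k strictly decreases)
def resolveB (pi : List Nat) (s : List Char) (c : Char) : Nat → Nat → Nat
  | 0, k => k
  | fuel + 1, k =>
    if k > 0 ∧ c ≠ PySem.List.pyGetD s (k : Int) ' ' then
      resolveB pi s c fuel (PySem.List.pyGetD pi ((k : Int) - 1) 0)
    else k

-- body of 'for i in range(1, n): …; pi[i] = k'  (state: the array pi and k)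
def piStep (s : List Char) (st : List Nat × Nat) (i : Int) : List Nat × Nat :=
  let c := PySem.List.pyGetD s i ' '
  let k := resolveB st.1 s c st.2 st.2
  let k' := if c = PySem.List.pyGetD s (k : Int) ' ' then k + 1 else k
  (PySem.List.pySetD st.1 i k', k')

def piLoopB (s : List Char) : List Nat × Nat :=
  (PySem.List.pyRange 1 (s.length : Int) 1).foldl (piStep s) (List.replicate s.length 0, 0)

-- while k > 0 and pi[k-1] > 0: k = pi[k-1]   (fuel = k again)
def chainB (pi : List Nat) : Nat → Nat → Nat
  | 0, k => k
  | fuel + 1, k =>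
    if k > 0 ∧ PySem.List.pyGetD pi ((k : Int) - 1) 0 > 0 then
      chainB pi fuel (PySem.List.pyGetD pi ((k : Int) - 1) 0)
    else k

-- per pair: shortest non-empty border length of s = b + '\0' + a (0 = no mesh)
def overlapB (a b : List Char) : Nat :=
  let s := b ++ '\x00' :: a
  let pi := (piLoopB s).1
  let k0 := PySem.List.pyGetD pi ((s.length : Int) - 1) 0
  chainB pi k0 k0

def meshAuxB : List (List Char × List Char) → List (List Char) → List Char
  | [], parts => parts.flatten
  | (a, b) :: rest, parts =>
    let k := overlapB a b
    if k = 0 then "failed to mesh".toList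
    else meshAuxB rest (parts ++ [PySem.List.slice b none (some (k : Int))])

def word_mesh_alt (words : List String) : String :=
  let ws := words.map String.toList
  String.ofList (meshAuxB (ws.zip (PySem.List.slice ws (some 1) none)) [])

-- ===== PRECONDITION & SPEC =====
def Spec_word_mesh (words : List String) (out : String) : Prop := out = word_mesh_alt words
instance (words : List String) (out : String) : Decidable (Spec_word_mesh words out) := by unfold Spec_word_mesh; infer_instance

-- ===== CLAIM (what is proved, stated in full; the proofs are below) =====
def Claim_equal_word_mesh : Prop := ∀ (words : List String), Dom_word_mesh words → Spec_word_mesh words (word_mesh words)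

-- ===== LEMMAS AND PROOFS =====

-- ---- border theory ----
-- a (proper) border of t of length k: the prefix of length k is also a suffix
def IsBorder (t : List Char) (k : Nat) : Prop := k < t.length ∧ t.take k <:+ t

def lb (t : List Char) : Nat :=
  Nat.findGreatest (fun k => k < t.length ∧ t.take k <:+ t) t.length

-- the overlap predicate: the suffix of a of length i is a prefix of b
def OvP (a b : List Char) (i : Nat) : Prop :=
  1 ≤ i ∧ i ≤ a.length ∧ a.drop (a.length - i) <+: b

theorem isBorder_zero {t : List Char} (h : t ≠ []) : IsBorder t 0 := by
  refine ⟨by cases t <;> simp_all, by simp⟩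

theorem lb_isBorder {t : List Char} (h : t ≠ []) : IsBorder t (lb t) := by
  have h0 : IsBorder t 0 := isBorder_zero h
  by_cases hz : lb t = 0
  · rw [hz]; exact h0
  · have := Nat.findGreatest_spec (P := fun k => k < t.length ∧ t.take k <:+ t)
      (m := 0) (n := t.length) (Nat.zero_le _) ⟨h0.1, h0.2⟩
    exact this

theorem le_lb {t : List Char} {k : Nat} (h : IsBorder t k) : k ≤ lb t :=
  Nat.le_findGreatest (Nat.le_of_lt h.1) ⟨h.1, h.2⟩

theorem lb_lt {t : List Char} (h : t ≠ []) : lb t < t.length :=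
  (lb_isBorder h).1

theorem length_take_of_le {t : List Char} {k : Nat} (h : k ≤ t.length) :
    (t.take k).length = k := by simp [Nat.min_eq_left h]

theorem take_ne_nil_of_pos {t : List Char} {k : Nat} (h0 : 0 < k) (h : k ≤ t.length) :
    t.take k ≠ [] := by
  intro hc
  have := length_take_of_le h
  rw [hc] at this; simp at this; omega

theorem isBorder_nest {t : List Char} {k j : Nat} (hk : IsBorder t k)
    (hj : IsBorder t j) (hjk : j < k) : IsBorder (t.take k) j := by
  refine ⟨by rw [length_take_of_le (Nat.le_of_lt hk.1)]; exact hjk, ?_⟩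
  have h1 : (t.take k).take j = t.take j := by
    rw [List.take_take, Nat.min_eq_left (Nat.le_of_lt hjk)]
  rw [h1]
  exact List.suffix_of_suffix_length_le hj.2 hk.2
    (by rw [length_take_of_le (Nat.le_of_lt hj.1), length_take_of_le (Nat.le_of_lt hk.1)]; omega)

theorem isBorder_of_take {t : List Char} {k j : Nat} (hk : IsBorder t k)
    (hj : IsBorder (t.take k) j) : IsBorder t j := by
  have hkl := hk.1
  have hjl : j < k := by
    have := hj.1; rwa [length_take_of_le (Nat.le_of_lt hkl)] at this
  refine ⟨Nat.lt_trans hjl hkl, ?_⟩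
  have h1 : (t.take k).take j = t.take j := by
    rw [List.take_take, Nat.min_eq_left (Nat.le_of_lt hjl)]
  have h2 := hj.2
  rw [h1] at h2
  exact h2.trans hk.2

theorem lb_take_lt {t : List Char} {k : Nat} (h0 : 0 < k) (hk : k ≤ t.length) :
    lb (t.take k) < k := by
  have := lb_lt (take_ne_nil_of_pos h0 hk)
  rwa [length_take_of_le hk] at this

theorem lb_eq_zero_iff {t : List Char} (h : t ≠ []) :
    lb t = 0 ↔ ∀ j, 0 < j → ¬ IsBorder t j := by
  constructor
  · intro hz j hj hb
    have := le_lb hb; omega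
  · intro hno
    by_contra hz
    exact hno _ (Nat.pos_of_ne_zero hz) (lb_isBorder h)

theorem suffix_append_singleton {u t : List Char} {x c : Char} :
    (u ++ [x]) <:+ (t ++ [c]) ↔ u <:+ t ∧ x = c := by
  constructor
  · rintro ⟨w, hw⟩
    rw [← List.append_assoc, ← List.concat_eq_append, ← List.concat_eq_append] at hw
    rcases List.concat_inj.mp hw with ⟨h1, h2⟩
    exact ⟨⟨w, h1⟩, h2⟩
  · rintro ⟨⟨w, hw⟩, rfl⟩
    exact ⟨w, by rw [← List.append_assoc, hw]⟩

theorem take_succ_getD (s : List Char) (i : Nat) (h : i < s.length) :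
    s.take (i + 1) = s.take i ++ [s.getD i ' '] := by
  rw [List.take_succ, List.getElem?_eq_getElem h, List.getD_eq_getElem _ _ h]
  rfl

theorem isBorder_append_succ {t : List Char} {c : Char} {j : Nat} :
    IsBorder (t ++ [c]) (j + 1) ↔ IsBorder t j ∧ t.getD j ' ' = c := by
  constructor
  · rintro ⟨hlen, hsuf⟩
    have hj : j < t.length := by simp at hlen; omega
    rw [List.take_append_of_le_length (by omega), take_succ_getD _ _ hj] at hsuf
    rcases suffix_append_singleton.mp hsuf with ⟨h1, h2⟩
    exact ⟨⟨hj, h1⟩, h2⟩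
  · rintro ⟨⟨hj, hsuf⟩, hc⟩
    refine ⟨by simp; omega, ?_⟩
    rw [List.take_append_of_le_length (by omega), take_succ_getD _ _ hj]
    exact suffix_append_singleton.mpr ⟨hsuf, hc⟩

theorem getD_take {s : List Char} {i j : Nat} (hj : j < i) (hjs : j < s.length) :
    (s.take i).getD j ' ' = s.getD j ' ' := by
  have h1 : j < (s.take i).length := by simp; omega
  rw [List.getD_eq_getElem _ _ h1, List.getD_eq_getElem _ _ hjs, List.getElem_take]

theorem pyGetD_int_pred (pi : List Nat) (k : Nat) (hk : 0 < k) :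
    PySem.List.pyGetD pi ((k : Int) - 1) 0 = pi.getD (k - 1) 0 := by
  have h : (k : Int) - 1 = ((k - 1 : Nat) : Int) := by omega
  rw [h, PySem.List.pyGetD_natCast]

-- ---- resolveB: the inner while loop finds the longest matching border ----
theorem resolve_correct (s : List Char) (i : Nat) (pi : List Nat) (c : Char)
    (hi : i ≤ s.length)
    (hpi : ∀ idx, idx < i - 1 → pi.getD idx 0 = lb (s.take (idx + 1))) :
    ∀ fuel k, k ≤ fuel → IsBorder (s.take i) k →
      IsBorder (s.take i) (resolveB pi s c fuel k) ∧
      resolveB pi s c fuel k ≤ k ∧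
      (c = s.getD (resolveB pi s c fuel k) ' ' ∨ resolveB pi s c fuel k = 0) ∧
      (∀ j, IsBorder (s.take i) j → j ≤ k → c = s.getD j ' ' → j ≤ resolveB pi s c fuel k) := by
  intro fuel
  induction fuel with
  | zero =>
    intro k hk hb
    interval_cases k
    refine ⟨by simpa [resolveB] using hb, by simp [resolveB], ?_, ?_⟩
    · right; simp [resolveB]
    · intro j hj hj0 _; simpa [resolveB] using hj0
  | succ fuel ih =>
    intro k hk hb
    have hki : k < i := by
      have := hb.1; rwa [length_take_of_le hi] at this
    by_cases hcond : k > 0 ∧ c ≠ PySem.List.pyGetD s (k : Int) ' '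
    · -- loop body runs: k := pi[k-1] = lb (s.take k)
      have hk0 : 0 < k := hcond.1
      have hres : resolveB pi s c (fuel + 1) k =
          resolveB pi s c fuel (PySem.List.pyGetD pi ((k : Int) - 1) 0) := by
        rw [resolveB, if_pos hcond]
      have hget : PySem.List.pyGetD pi ((k : Int) - 1) 0 = lb (s.take k) := by
        rw [pyGetD_int_pred _ _ hk0, hpi (k - 1) (by omega)]
        have hkk : k - 1 + 1 = k := by omega
        rw [hkk]
      have hks : k ≤ s.length := by omega
      have hlbk : lb (s.take k) < k := lb_take_lt hk0 hks
      have hbk : IsBorder (s.take i) (lb (s.take k)) := by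
        have h1 : (s.take i).take k = s.take k := by
          rw [List.take_take, Nat.min_eq_left (Nat.le_of_lt hki)]
        have h2 : IsBorder ((s.take i).take k) (lb (s.take k)) := by
          rw [h1]; exact lb_isBorder (take_ne_nil_of_pos hk0 hks)
        exact isBorder_of_take hb h2
      rw [hres, hget]
      obtain ⟨r1, r2, r3, r4⟩ := ih (lb (s.take k)) (by omega) hbk
      refine ⟨r1, Nat.le_trans r2 (Nat.le_of_lt hlbk), r3, ?_⟩
      intro j hj hjk hjc
      rcases Nat.lt_or_ge j k with hjlt | hjge
      · -- j < k: j is a border of s.take k, hence ≤ lb (s.take k)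
        rcases Nat.eq_zero_or_pos j with rfl | hj0
        · exact r4 0 hj (Nat.zero_le _) hjc
        · have h1 : (s.take i).take k = s.take k := by
            rw [List.take_take, Nat.min_eq_left (Nat.le_of_lt hki)]
          have h2 : IsBorder (s.take k) j := by
            have := isBorder_nest hb hj hjlt
            rwa [h1] at this
          exact r4 j hj (le_lb h2) hjc
      · -- j = k: contradiction with the mismatch
        have hjk' : j = k := by omega
        subst hjk'
        exfalso
        apply hcond.2
        rw [PySem.List.pyGetD_natCast]
        exact hjc
    · -- loop exits: result k
      have hres : resolveB pi s c (fuel + 1) k = k := by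
        rw [resolveB, if_neg hcond]
      rw [hres]
      refine ⟨hb, le_refl _, ?_, fun j _ hjk _ => hjk⟩
      push_neg at hcond
      rcases Nat.eq_zero_or_pos k with rfl | hk0
      · right; rfl
      · left
        have := hcond hk0
        rwa [PySem.List.pyGetD_natCast] at this

-- ---- the longest border of t ++ [c] from the resolved border of t ----
theorem lb_append (t : List Char) (c : Char) (r : Nat) (ht : t ≠ [])
    (hr : IsBorder t r) (hstop : c = t.getD r ' ' ∨ r = 0)
    (hmax : ∀ j, IsBorder t j → c = t.getD j ' ' → j ≤ r) :
    lb (t ++ [c]) = if c = t.getD r ' ' then r + 1 else r := by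
  have hne : t ++ [c] ≠ [] := by simp
  have hLb : IsBorder (t ++ [c]) (lb (t ++ [c])) := lb_isBorder hne
  by_cases hc : c = t.getD r ' '
  · rw [if_pos hc]
    have h1 : IsBorder (t ++ [c]) (r + 1) := isBorder_append_succ.mpr ⟨hr, hc.symm⟩
    have h2 : r + 1 ≤ lb (t ++ [c]) := le_lb h1
    have h3 : lb (t ++ [c]) ≤ r + 1 := by
      rcases Nat.eq_zero_or_pos (lb (t ++ [c])) with hz | hpos
      · omega
      · obtain ⟨j, hj⟩ : ∃ j, lb (t ++ [c]) = j + 1 := ⟨lb (t ++ [c]) - 1, by omega⟩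
        rw [hj] at hLb
        rcases isBorder_append_succ.mp hLb with ⟨hbj, hcj⟩
        have := hmax j hbj hcj.symm
        omega
    omega
  · rw [if_neg hc]
    rcases hstop with hstop | hstop
    · exact absurd hstop hc
    · subst hstop
      by_contra hz
      have hpos : 0 < lb (t ++ [c]) := Nat.pos_of_ne_zero hz
      obtain ⟨j, hj⟩ : ∃ j, lb (t ++ [c]) = j + 1 := ⟨lb (t ++ [c]) - 1, by omega⟩
      rw [hj] at hLb
      rcases isBorder_append_succ.mp hLb with ⟨hbj, hcj⟩
      have hj0 : j = 0 := by have := hmax j hbj hcj.symm; omega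
      subst hj0
      exact hc hcj.symm

-- ---- the prefix-function loop invariant ----
theorem piLoop_inv (s : List Char) : ∀ m, 1 ≤ m → m ≤ s.length →
    ((PySem.List.pyRange 1 (m : Int) 1).foldl (piStep s)
        (List.replicate s.length 0, 0)).1.length = s.length ∧
    (∀ idx, idx < m →
      ((PySem.List.pyRange 1 (m : Int) 1).foldl (piStep s)
        (List.replicate s.length 0, 0)).1.getD idx 0 = lb (s.take (idx + 1))) ∧
    ((PySem.List.pyRange 1 (m : Int) 1).foldl (piStep s)
        (List.replicate s.length 0, 0)).2 = lb (s.take m) := by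
  intro m
  induction m with
  | zero => omega
  | succ m ih =>
    intro _ hm1
    rcases Nat.eq_zero_or_pos m with rfl | hmpos
    · -- m + 1 = 1 : empty range, initial state
      have hs : s ≠ [] := by intro h; subst h; simp at hm1
      have hr : PySem.List.pyRange 1 ((1 : Nat) : Int) 1 = [] :=
        PySem.List.pyRange_one_eq_nil (by norm_num)
      rw [hr]
      simp only [List.foldl_nil]
      have hlb1 : lb (s.take 1) = 0 := by
        have h1 : (s.take 1).length = 1 := length_take_of_le (by omega)
        have := lb_lt (t := s.take 1) (by intro h; rw [h] at h1; simp at h1)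
        omega
      refine ⟨by simp, ?_, by simp [hlb1]⟩
      intro idx hidx
      interval_cases idx
      simp [List.getD_eq_getElem?_getD, hlb1]
    · -- step: process index i = m
      obtain ⟨hlen, hidx, hk⟩ := ih hmpos (by omega)
      have hsplit : PySem.List.pyRange 1 ((m + 1 : Nat) : Int) 1 =
          PySem.List.pyRange 1 (m : Int) 1 ++ [(m : Int)] := by
        have : ((m + 1 : Nat) : Int) = (m : Int) + 1 := by push_cast; ring
        rw [this]
        exact PySem.List.pyRange_one_succ_right (by exact_mod_cast hmpos)
      rw [hsplit, List.foldl_append, List.foldl_cons, List.foldl_nil]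
      set st := (PySem.List.pyRange 1 (m : Int) 1).foldl (piStep s)
        (List.replicate s.length 0, 0) with hst
      -- unfold one step
      have hms : m < s.length := by omega
      have htm : s.take m ≠ [] := take_ne_nil_of_pos hmpos (by omega)
      have hb0 : IsBorder (s.take m) st.2 := by rw [hk]; exact lb_isBorder htm
      obtain ⟨r1, r2, r3, r4⟩ := resolve_correct s m st.1
        (PySem.List.pyGetD s (m : Int) ' ') (by omega)
        (fun idx h => hidx idx (by omega)) st.2 st.2 (le_refl _) hb0
      set c := PySem.List.pyGetD s (m : Int) ' ' with hc
      set r := resolveB st.1 s c st.2 st.2 with hrdef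
      have hcs : c = s.getD m ' ' := by rw [hc, PySem.List.pyGetD_natCast]
      have hrm : r < m := by
        have := r1.1; rwa [length_take_of_le (by omega)] at this
      -- border facts transported to t := s.take m
      have hgetDr : (s.take m).getD r ' ' = s.getD r ' ' := getD_take hrm (by omega)
      have hrs : c = PySem.List.pyGetD s (r : Int) ' ' ↔ c = (s.take m).getD r ' ' := by
        rw [PySem.List.pyGetD_natCast, hgetDr]
      have happ : s.take m ++ [c] = s.take (m + 1) := by
        rw [hcs, take_succ_getD s m hms]
      have hmax' : ∀ j, IsBorder (s.take m) j → c = (s.take m).getD j ' ' → j ≤ r := by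
        intro j hj hjc
        have hjm : j < m := by
          have := hj.1; rwa [length_take_of_le (by omega)] at this
        refine r4 j hj ?_ ?_
        · rw [hk]; exact le_lb hj
        · rwa [getD_take hjm (by omega)] at hjc
      have hstop' : c = (s.take m).getD r ' ' ∨ r = 0 := by
        rcases r3 with h | h
        · left; rw [h, hgetDr]
        · right; exact h
      have hlb' : lb (s.take (m + 1)) =
          if c = (s.take m).getD r ' ' then r + 1 else r := by
        rw [← happ]
        exact lb_append (s.take m) c r htm r1 hstop' hmax'
      -- now unfold piStep
      have hstep : piStep s st (m : Int) =
          (PySem.List.pySetD st.1 (m : Int) (if c = PySem.List.pyGetD s (r : Int) ' ' then r + 1 else r),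
           if c = PySem.List.pyGetD s (r : Int) ' ' then r + 1 else r) := by
        rw [piStep]
      set k' := if c = PySem.List.pyGetD s (r : Int) ' ' then r + 1 else r with hk'
      have hk'lb : k' = lb (s.take (m + 1)) := by
        rw [hk', hlb']
        by_cases h : c = (s.take m).getD r ' '
        · rw [if_pos h, if_pos (hrs.mpr h)]
        · rw [if_neg h, if_neg (fun hh => h (hrs.mp hh))]
      have hset : PySem.List.pySetD st.1 (m : Int) k' = st.1.set m k' := by
        rw [PySem.List.pySetD_natCast]
      rw [hstep]
      refine ⟨by simp [hset, hlen], ?_, hk'lb⟩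
      intro idx hidx'
      rcases Nat.lt_or_ge idx m with hlt | hge
      · -- untouched entry
        have h1 : idx < st.1.length := by omega
        have h2 : idx < (st.1.set m k').length := by rw [List.length_set]; omega
        rw [hset, List.getD_eq_getElem _ _ h2, List.getElem_set_ne (by omega), ← List.getD_eq_getElem _ _ h1]
        exact hidx idx hlt
      · -- idx = m: the new entry
        have hidxm : idx = m := by omega
        subst hidxm
        have h2 : idx < (st.1.set idx k').length := by rw [List.length_set]; omega
        rw [hset, List.getD_eq_getElem _ _ h2, List.getElem_set_self (by omega)]
        exact hk'lb

-- ---- the final while loop: down the failure chain to the shortest border ----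
theorem chain_correct (s : List Char) (pi : List Nat)
    (hpi : ∀ idx, idx < s.length → pi.getD idx 0 = lb (s.take (idx + 1))) :
    ∀ fuel k, k ≤ fuel → 0 < k → IsBorder s k →
      0 < chainB pi fuel k ∧ IsBorder s (chainB pi fuel k) ∧
      ∀ j, 0 < j → j ≤ k → IsBorder s j → chainB pi fuel k ≤ j := by
  intro fuel
  induction fuel with
  | zero => intro k hk h0 _; omega
  | succ fuel ih =>
    intro k hk h0 hb
    have hks : k < s.length := hb.1
    have hget : PySem.List.pyGetD pi ((k : Int) - 1) 0 = lb (s.take k) := by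
      rw [pyGetD_int_pred _ _ h0, hpi (k - 1) (by omega)]
      have hkk : k - 1 + 1 = k := by omega
      rw [hkk]
    by_cases hcond : k > 0 ∧ PySem.List.pyGetD pi ((k : Int) - 1) 0 > 0
    · have hres : chainB pi (fuel + 1) k = chainB pi fuel (PySem.List.pyGetD pi ((k : Int) - 1) 0) := by
        rw [chainB, if_pos hcond]
      have hk2pos : 0 < lb (s.take k) := by rw [← hget]; exact hcond.2
      have hk2lt : lb (s.take k) < k := lb_take_lt h0 (by omega)
      have hbk2 : IsBorder s (lb (s.take k)) :=
        isBorder_of_take hb (lb_isBorder (take_ne_nil_of_pos h0 (by omega)))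
      rw [hres, hget]
      obtain ⟨r1, r2, r3⟩ := ih (lb (s.take k)) (by omega) hk2pos hbk2
      refine ⟨r1, r2, ?_⟩
      intro j hj0 hjk hjb
      rcases Nat.lt_or_ge j k with hjlt | hjge
      · exact r3 j hj0 (le_lb (isBorder_nest hb hjb hjlt)) hjb
      · have : j = k := by omega
        subst this
        have := r3 _ hk2pos (le_refl _) hbk2
        omega
    · have hres : chainB pi (fuel + 1) k = k := by rw [chainB, if_neg hcond]
      rw [hres]
      refine ⟨h0, hb, ?_⟩
      intro j hj0 hjk hjb
      push_neg at hcond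
      have hlb0 : lb (s.take k) = 0 := by
        have := hcond h0; omega
      rcases Nat.lt_or_ge j k with hjlt | _
      · exfalso
        have := le_lb (isBorder_nest hb hjb hjlt)
        omega
      · omega

-- ---- borders of b ++ '\x00' :: a are exactly the overlaps ----
theorem append_sep_inj {xs ys u v : List Char} {c : Char} (hx : c ∉ xs) (hy : c ∉ ys)
    (h : xs ++ c :: u = ys ++ c :: v) : xs.length = ys.length := by
  induction xs generalizing ys with
  | nil =>
    cases ys with
    | nil => rfl
    | cons y ys =>
      simp only [List.nil_append, List.cons_append, List.cons.injEq] at h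
      exact absurd (h.1 ▸ List.mem_cons_self) hy
  | cons x xs ihx =>
    cases ys with
    | nil =>
      simp only [List.cons_append, List.nil_append, List.cons.injEq] at h
      exact absurd (h.1 ▸ List.mem_cons_self) hx
    | cons y ys =>
      simp only [List.cons_append, List.cons.injEq] at h
      have := ihx (fun hm => hx (List.mem_cons_of_mem _ hm))
        (fun hm => hy (List.mem_cons_of_mem _ hm)) h.2
      simp [this]

theorem border_iff_ov {a b : List Char} (hsa : '\x00' ∉ a) (hsb : '\x00' ∉ b)
    {k : Nat} (hk : 1 ≤ k) :
    IsBorder (b ++ '\x00' :: a) k ↔ OvP a b k := by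
  set A := a.length with hA
  set B := b.length with hB
  have hlen : (b ++ '\x00' :: a).length = B + 1 + A := by simp [hA, hB]; omega
  constructor
  · rintro ⟨hklen, hsuf⟩
    rw [hlen] at hklen
    have hu : (b ++ '\x00' :: a).take k =
        (b ++ '\x00' :: a).drop ((b ++ '\x00' :: a).length - k) := by
      have := List.suffix_iff_eq_drop.mp hsuf
      rwa [length_take_of_le (by rw [hlen]; omega)] at this
    rw [hlen] at hu
    by_cases hkB : k ≤ B <;> by_cases hkA : k ≤ A
    · -- the real case
      have htake : (b ++ '\x00' :: a).take k = b.take k :=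
        List.take_append_of_le_length hkB
      have hdrop : (b ++ '\x00' :: a).drop (B + 1 + A - k) = a.drop (A - k) := by
        rw [List.drop_append]
        have h1 : b.drop (B + 1 + A - k) = [] := List.drop_eq_nil_of_le (by omega)
        have h2 : B + 1 + A - k - B = A - k + 1 := by omega
        rw [h1, h2, List.nil_append, List.drop_succ_cons]
      rw [htake, hdrop] at hu
      refine ⟨hk, hkA, ?_⟩
      rw [← hu]; exact List.take_prefix _ _
    · -- k ≤ B, k > A: suffix contains the separator, prefix does not
      exfalso
      have htake : (b ++ '\x00' :: a).take k = b.take k :=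
        List.take_append_of_le_length hkB
      have hdrop : (b ++ '\x00' :: a).drop (B + 1 + A - k) =
          b.drop (B + 1 + A - k) ++ '\x00' :: a := by
        rw [List.drop_append]
        have : B + 1 + A - k - B = 0 := by omega
        rw [this, List.drop_zero]
      rw [htake, hdrop] at hu
      have hmem : '\x00' ∈ b.take k := by
        rw [hu]; exact List.mem_append_right _ List.mem_cons_self
      exact hsb (List.mem_of_mem_take hmem)
    · -- k > B, k ≤ A
      exfalso
      have htake : (b ++ '\x00' :: a).take k = b ++ '\x00' :: a.take (k - B - 1) := by
        rw [List.take_append]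
        have h1 : b.take k = b := List.take_of_length_le (by omega)
        rw [h1]
        have h2 : k - B = (k - B - 1) + 1 := by omega
        conv_lhs => rw [h2]
        rw [List.take_succ_cons]
      have hdrop : (b ++ '\x00' :: a).drop (B + 1 + A - k) = a.drop (A - k) := by
        rw [List.drop_append]
        have h1 : b.drop (B + 1 + A - k) = [] := List.drop_eq_nil_of_le (by omega)
        have h2 : B + 1 + A - k - B = A - k + 1 := by omega
        rw [h1, h2, List.nil_append, List.drop_succ_cons]
      rw [htake, hdrop] at hu
      have hmem : '\x00' ∈ a.drop (A - k) := by
        rw [← hu]; exact List.mem_append_right _ List.mem_cons_self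
      exact hsa (List.mem_of_mem_drop hmem)
    · -- k > B, k > A: separator positions disagree
      exfalso
      have htake : (b ++ '\x00' :: a).take k = b ++ '\x00' :: a.take (k - B - 1) := by
        rw [List.take_append]
        have h1 : b.take k = b := List.take_of_length_le (by omega)
        rw [h1]
        have h2 : k - B = (k - B - 1) + 1 := by omega
        conv_lhs => rw [h2]
        rw [List.take_succ_cons]
      have hdrop : (b ++ '\x00' :: a).drop (B + 1 + A - k) =
          b.drop (B + 1 + A - k) ++ '\x00' :: a := by
        rw [List.drop_append]
        have : B + 1 + A - k - B = 0 := by omega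
        rw [this, List.drop_zero]
      rw [htake, hdrop] at hu
      have hinj := append_sep_inj hsb (fun hm => hsb (List.mem_of_mem_drop hm)) hu
      have hld : (b.drop (B + 1 + A - k)).length = b.length - (B + 1 + A - k) := by simp
      omega
  · rintro ⟨h1, h2, h3⟩
    have hlp : (a.drop (A - k)).length = k := by simp; omega
    have hkB : k ≤ B := by
      have := h3.length_le; rw [hlp] at this; exact this
    have heq : a.drop (A - k) = b.take k := by
      have := List.prefix_iff_eq_take.mp h3
      rwa [hlp] at this
    refine ⟨by omega, ?_⟩
    have htake : (b ++ '\x00' :: a).take k = b.take k :=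
      List.take_append_of_le_length hkB
    have hdrop : (b ++ '\x00' :: a).drop ((b ++ '\x00' :: a).length - k) = a.drop (A - k) := by
      rw [hlen, List.drop_append]
      have hh1 : b.drop (B + 1 + A - k) = [] := List.drop_eq_nil_of_le (by omega)
      have hh2 : B + 1 + A - k - B = A - k + 1 := by omega
      rw [hh1, hh2, List.nil_append, List.drop_succ_cons]
    rw [htake, heq.symm, ← hdrop]
    exact List.drop_suffix _ _

-- ---- overlapB computes the least overlap ----
theorem pi_final (s : List Char) (hs : s ≠ []) :
    ∀ idx, idx < s.length → (piLoopB s).1.getD idx 0 = lb (s.take (idx + 1)) := by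
  have h1 : 1 ≤ s.length := by have := List.length_pos_of_ne_nil hs; omega
  have := piLoop_inv s s.length h1 (le_refl _)
  intro idx hidx
  exact this.2.1 idx hidx

theorem overlapB_eq_zero {a b : List Char} (hsa : '\x00' ∉ a) (hsb : '\x00' ∉ b)
    (h : ∀ i, ¬ OvP a b i) : overlapB a b = 0 := by
  set s := b ++ '\x00' :: a with hsdef
  have hs : s ≠ [] := by simp [hsdef]
  have hlb : lb s = 0 := by
    rw [lb_eq_zero_iff hs]
    intro j hj hb
    exact h j ((border_iff_ov hsa hsb hj).mp hb)
  have hk0 : PySem.List.pyGetD (piLoopB s).1 ((s.length : Int) - 1) 0 = 0 := by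
    have h1 : 1 ≤ s.length := by have := List.length_pos_of_ne_nil hs; omega
    rw [pyGetD_int_pred _ _ h1, pi_final s hs (s.length - 1) (by omega)]
    have : s.length - 1 + 1 = s.length := by omega
    rw [this, List.take_length, hlb]
  show chainB (piLoopB s).1 _ _ = 0
  rw [hk0]
  rfl

theorem overlapB_eq_least {a b : List Char} (hsa : '\x00' ∉ a) (hsb : '\x00' ∉ b)
    {i : Nat} (hi : OvP a b i) (hmin : ∀ j, OvP a b j → i ≤ j) : overlapB a b = i := by
  set s := b ++ '\x00' :: a with hsdef
  have hs : s ≠ [] := by simp [hsdef]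
  have h1 : 1 ≤ s.length := by have := List.length_pos_of_ne_nil hs; omega
  have hbi : IsBorder s i := (border_iff_ov hsa hsb hi.1).mpr hi
  have hlbpos : 0 < lb s := by
    have := le_lb hbi
    have := hi.1
    omega
  have hk0 : PySem.List.pyGetD (piLoopB s).1 ((s.length : Int) - 1) 0 = lb s := by
    rw [pyGetD_int_pred _ _ h1, pi_final s hs (s.length - 1) (by omega)]
    have : s.length - 1 + 1 = s.length := by omega
    rw [this, List.take_length]
  show chainB (piLoopB s).1 _ _ = i
  rw [hk0]
  obtain ⟨r1, r2, r3⟩ := chain_correct s (piLoopB s).1 (pi_final s hs)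
    (lb s) (lb s) (le_refl _) hlbpos (lb_isBorder hs)
  have hrov : OvP a b (chainB (piLoopB s).1 (lb s) (lb s)) :=
    (border_iff_ov hsa hsb r1).mp r2
  have h5 := hmin _ hrov
  have h6 := r3 i hi.1 (le_lb hbi) hbi
  omega

-- ---- the naive scan of A finds the least overlap ----
theorem lcsAux_no (a b : List Char) :
    ∀ n lo, 1 ≤ lo → a.length + 1 - lo ≤ n → (∀ i, lo ≤ i → ¬ OvP a b i) →
      lcsAuxA a b (PySem.List.pyRange (lo : Int) ((a.length : Int) + 1) 1) = [] := by
  intro n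
  induction n with
  | zero =>
    intro lo hlo hn _
    have : PySem.List.pyRange (lo : Int) ((a.length : Int) + 1) 1 = [] :=
      PySem.List.pyRange_one_eq_nil (by omega)
    rw [this, lcsAuxA]
  | succ n ih =>
    intro lo hlo hn hno
    rcases Nat.lt_or_ge a.length lo with hgt | hle
    · have : PySem.List.pyRange (lo : Int) ((a.length : Int) + 1) 1 = [] :=
        PySem.List.pyRange_one_eq_nil (by omega)
      rw [this, lcsAuxA]
    · have hcons : PySem.List.pyRange (lo : Int) ((a.length : Int) + 1) 1 =
          (lo : Int) :: PySem.List.pyRange ((lo : Int) + 1) ((a.length : Int) + 1) 1 :=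
        PySem.List.pyRange_one_cons (by omega)
      rw [hcons, lcsAuxA]
      have hslice : PySem.List.slice a (some (-(lo : Int))) none = a.drop (a.length - lo) :=
        PySem.List.slice_from_neg_natCast a lo (by omega)
      have hsw : PySem.Chars.startswith b (PySem.List.slice a (some (-(lo : Int))) none) = false := by
        rw [hslice]
        by_contra hcontra
        have : PySem.Chars.startswith b (a.drop (a.length - lo)) = true := by
          cases hq : PySem.Chars.startswith b (a.drop (a.length - lo)) with
          | true => rfl
          | false => rw [hq] at hcontra; exact absurd rfl hcontra
        have hpre := (PySem.Chars.startswith_iff _ _).mp this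
        exact hno lo (le_refl _) ⟨hlo, hle, hpre⟩
      rw [hsw]
      simp only [Bool.false_eq_true, if_false]
      have hcast : (lo : Int) + 1 = ((lo + 1 : Nat) : Int) := by push_cast; ring
      rw [hcast]
      exact ih (lo + 1) (by omega) (by omega) (fun i hi => hno i (by omega))

theorem lcsAux_found (a b : List Char) :
    ∀ n lo i, 1 ≤ lo → lo ≤ i → a.length + 1 - lo ≤ n → OvP a b i →
      (∀ j, lo ≤ j → j < i → ¬ OvP a b j) →
      lcsAuxA a b (PySem.List.pyRange (lo : Int) ((a.length : Int) + 1) 1) =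
        a.drop (a.length - i) := by
  intro n
  induction n with
  | zero =>
    intro lo i hlo hloi hn hov _
    exfalso
    have := hov.2.1
    omega
  | succ n ih =>
    intro lo i hlo hloi hn hov hmin
    have hiA : i ≤ a.length := hov.2.1
    have hcons : PySem.List.pyRange (lo : Int) ((a.length : Int) + 1) 1 =
        (lo : Int) :: PySem.List.pyRange ((lo : Int) + 1) ((a.length : Int) + 1) 1 :=
      PySem.List.pyRange_one_cons (by omega)
    rw [hcons, lcsAuxA]
    have hslice : PySem.List.slice a (some (-(lo : Int))) none = a.drop (a.length - lo) :=
      PySem.List.slice_from_neg_natCast a lo (by omega)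
    rcases Nat.eq_or_lt_of_le hloi with rfl | hlt
    · -- found at lo
      have hsw : PySem.Chars.startswith b (PySem.List.slice a (some (-(lo : Int))) none) = true := by
        rw [hslice]
        exact (PySem.Chars.startswith_iff _ _).mpr hov.2.2
      rw [hsw]
      simp only [if_true]
      exact hslice
    · -- not yet
      have hsw : PySem.Chars.startswith b (PySem.List.slice a (some (-(lo : Int))) none) = false := by
        rw [hslice]
        by_contra hcontra
        have : PySem.Chars.startswith b (a.drop (a.length - lo)) = true := by
          cases hq : PySem.Chars.startswith b (a.drop (a.length - lo)) with
          | true => rfl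
          | false => rw [hq] at hcontra; exact absurd rfl hcontra
        have hpre := (PySem.Chars.startswith_iff _ _).mp this
        exact hmin lo (le_refl _) hlt ⟨hlo, by omega, hpre⟩
      rw [hsw]
      simp only [Bool.false_eq_true, if_false]
      have hcast : (lo : Int) + 1 = ((lo + 1 : Nat) : Int) := by push_cast; ring
      rw [hcast]
      exact ih (lo + 1) i (by omega) (by omega) (by omega) hov
        (fun j hj1 hj2 => hmin j (by omega) hj2)

theorem lcsA_no {a b : List Char} (h : ∀ i, ¬ OvP a b i) : lcsA a b = [] := by
  have : ((a.length : Int) + 1) = (((a.length + 1 : Nat)) : Int) := by push_cast; ring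
  rw [lcsA, show ((1:Int)) = ((1 : Nat) : Int) by norm_num]
  exact lcsAux_no a b (a.length + 1) 1 (le_refl _) (by omega) (fun i _ => h i)

theorem lcsA_found {a b : List Char} {i : Nat} (hov : OvP a b i)
    (hmin : ∀ j, j < i → ¬ OvP a b j) : lcsA a b = a.drop (a.length - i) := by
  rw [lcsA, show ((1:Int)) = ((1 : Nat) : Int) by norm_num]
  exact lcsAux_found a b (a.length + 1) 1 i (le_refl _) hov.1 (by omega) hov
    (fun j _ hj => hmin j hj)

-- ---- the main fold equivalence ----
theorem mesh_eq : ∀ (l : List (List Char × List Char)) (acc : List (List Char)),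
    (∀ p ∈ l, '\x00' ∉ p.1 ∧ '\x00' ∉ p.2) →
    meshAuxA l acc.flatten = meshAuxB l acc := by
  intro l
  induction l with
  | nil => intro acc _; rfl
  | cons p rest ih =>
    intro acc hsep
    obtain ⟨a, b⟩ := p
    obtain ⟨hsa, hsb⟩ := hsep (a, b) List.mem_cons_self
    have hrest : ∀ q ∈ rest, '\x00' ∉ q.1 ∧ '\x00' ∉ q.2 :=
      fun q hq => hsep q (List.mem_cons_of_mem _ hq)
    by_cases hex : ∃ i, OvP a b i
    · haveI : DecidablePred (OvP a b) := fun i => by unfold OvP; infer_instance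
      set i₀ := Nat.find hex with hi₀
      have hov : OvP a b i₀ := Nat.find_spec hex
      have hmin : ∀ j, j < i₀ → ¬ OvP a b j := fun j hj => Nat.find_min hex hj
      have hmin' : ∀ j, OvP a b j → i₀ ≤ j := fun j hj => Nat.find_min' hex hj
      have hlcs : lcsA a b = a.drop (a.length - i₀) := lcsA_found hov hmin
      have hO : overlapB a b = i₀ := overlapB_eq_least hsa hsb hov hmin'
      have hpos : 1 ≤ i₀ := hov.1
      have hle : i₀ ≤ a.length := hov.2.1
      have hlen : (a.drop (a.length - i₀)).length = i₀ := by
        rw [List.length_drop]; omega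
      have hne : lcsA a b ≠ [] := by
        rw [hlcs]
        intro hc
        rw [hc] at hlen
        simp at hlen
        omega
      have heq : a.drop (a.length - i₀) = b.take i₀ := by
        have := List.prefix_iff_eq_take.mp hov.2.2
        rwa [hlen] at this
      rw [meshAuxA, meshAuxB]
      simp only [hO, hlcs]
      rw [if_neg (by rw [← hlcs]; exact hne), if_neg (by omega)]
      have hslice : PySem.List.slice b none (some ((i₀ : Nat) : Int)) = b.take i₀ :=
        PySem.List.slice_to_natCast b i₀
      rw [hslice]
      have hacc : acc.flatten ++ a.drop (a.length - i₀) = (acc ++ [b.take i₀]).flatten := by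
        rw [heq]; simp
      rw [hacc]
      exact ih (acc ++ [b.take i₀]) hrest
    · push_neg at hex
      have hlcs : lcsA a b = [] := lcsA_no hex
      have hO : overlapB a b = 0 := overlapB_eq_zero hsa hsb hex
      rw [meshAuxA, meshAuxB]
      simp [hO, hlcs]

-- ===== VERDICT (by name: the statement is the Claim_ definition above) =====
theorem word_mesh_spec : Claim_equal_word_mesh := by
  intro words hdom
  have hz : ∀ w ∈ words.map String.toList, '\x00' ∉ w := by
    intro w hw
    rcases List.mem_map.mp hw with ⟨str, hstr, rfl⟩
    have hall : pvDomStr str = true := by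
      have hd := hdom
      unfold Dom_word_mesh at hd
      exact List.all_eq_true.mp hd str hstr
    intro hmem
    have := List.all_eq_true.mp hall _ hmem
    simp [pvDomChar] at this
  have hpairs : ∀ p ∈ (words.map String.toList).zip
      (PySem.List.slice (words.map String.toList) (some 1) none),
      '\x00' ∉ p.1 ∧ '\x00' ∉ p.2 := by
    intro p hp
    obtain ⟨x, y⟩ := p
    obtain ⟨h1, h2⟩ := List.of_mem_zip hp
    exact ⟨hz _ h1, hz _ (PySem.List.mem_of_mem_slice _ _ _ h2)⟩
  exact congrArg String.ofList (mesh_eq _ [] hpairs)
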